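-- pv_equiv track=rewrite | github.com/zhuanglaihong/HydroAgent | builder/execution_mode.py | _count_parallel_branches
-- ===== SOURCE A (Python) =====
-- from typing import Dict, List, Any, Optional
--
-- def _count_parallel_branches(dependency_graph: Dict[str, List[str]]) -> int:
--     """计算并行分支数量"""
--     # 简化计算：统计同一层级的任务数量
--     levels = {}
--
--     def assign_level(task_id: str, level: int = 0, visited: set = None):
--         if visited is None:
--             visited = set()
--
--         if task_id in visited:
--             return
--
--         visited.add(task_id)
--
--         if level not in levels:
--             levels[level] = []
--         levels[level].append(task_id)
--
--         # 处理依赖这个任务的其他任务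
--         for other_task, deps in dependency_graph.items():
--             if task_id in deps:
--                 assign_level(other_task, level + 1, visited.copy())
--
--     # 从没有依赖的任务开始
--     independent_tasks = [
--         task_id for task_id, deps in dependency_graph.items() if not deps
--     ]
--
--     for task_id in independent_tasks:
--         assign_level(task_id, 0)
--
--     # 返回最大层级的任务数量
--     if not levels:
--         return 0
--
--     return max(len(tasks) for tasks in levels.values())
-- ===== SOURCE B (Python) =====
-- def _count_parallel_branches(dependency_graph):
--     """计算并行分支数量 — iterative DFS with an explicit stack instead of recursion."""
--     counts = {}
--     stack = [
--         (task_id, 0, frozenset())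
--         for task_id, deps in dependency_graph.items()
--         if not deps
--     ]
--     stack.reverse()
--     while stack:
--         task_id, level, visited = stack.pop()
--         if task_id in visited:
--             continue
--         counts[level] = counts.get(level, 0) + 1
--         child_visited = visited | {task_id}
--         children = [
--             (other_task, level + 1, child_visited)
--             for other_task, deps in dependency_graph.items()
--             if task_id in deps
--         ]
--         stack.extend(reversed(children))
--     if not counts:
--         return 0
--     return max(counts.values())
-- ===== Notes on version B (the rewrite author's own statement) =====
-- stated objective: alternative
-- what changed: Replaces A's recursive assign_level (a nested function mutating a shared levels dict of task-id lists via copied visited sets) with an iterative DFS over an explicit stack of (task, level, visited) frames that increments a level-to-count dict directly.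
import Mathlib
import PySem

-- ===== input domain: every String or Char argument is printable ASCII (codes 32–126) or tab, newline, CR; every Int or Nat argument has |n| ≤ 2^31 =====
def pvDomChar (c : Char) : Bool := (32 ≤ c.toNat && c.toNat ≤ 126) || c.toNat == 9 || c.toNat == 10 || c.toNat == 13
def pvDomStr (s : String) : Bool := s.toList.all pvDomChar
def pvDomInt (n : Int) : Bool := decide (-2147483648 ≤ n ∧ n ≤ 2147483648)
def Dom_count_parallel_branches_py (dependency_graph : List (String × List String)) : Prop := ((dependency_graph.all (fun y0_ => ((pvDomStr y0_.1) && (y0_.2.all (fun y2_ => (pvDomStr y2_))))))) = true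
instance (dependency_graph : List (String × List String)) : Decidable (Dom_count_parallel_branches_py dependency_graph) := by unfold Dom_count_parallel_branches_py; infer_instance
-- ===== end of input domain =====

-- B replaces A's recursive `assign_level` (a nested function mutating a shared levels
-- dict of task-id lists) by an iterative DFS over an explicit stack of
-- (task, level, visited) frames that increments a level→count dict directly;
-- same values, no speed claim (objective: alternative).

-- Shared totality helper: number of graph keys not yet visited.  It is only a
-- termination measure; the `pvFree … < pvFree …` guards in the ports below never
-- fail on any call the Python programs actually make (every task pushed/recursed
-- on is a fresh graph key), they merely make the recursions total.
def pvFree (g : List (String × List String)) (vis : List String) : Nat :=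
  ((g.map Prod.fst).toFinset \ vis.toFinset).card

-- ===== PORT A =====
-- Python: `if level not in levels: levels[level] = []` ; `levels[level].append(task_id)`
def pvDictAppend (d : PySem.Dict Int (List String)) (l : Int) (t : String) :
    PySem.Dict Int (List String) :=
  let d1 := if d.contains l then d else d.insert l []
  d1.modify l [] (fun ts => ts ++ [t])

mutual
-- Python's recursive `assign_level(task_id, level, visited)` threading the `levels` dict.
def count_pb_assign (g : List (String × List String)) (t : String) (l : Int)
    (vis : PySem.Set String) (levels : PySem.Dict Int (List String)) :
    PySem.Dict Int (List String) :=
  if PySem.Set.contains vis t then levels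
  else
    let vis' := PySem.Set.add vis t
    let levels1 := pvDictAppend levels l t
    if h : pvFree g vis' < pvFree g vis then count_pb_loop g g t l vis' levels1
    else levels1
termination_by (pvFree g vis + 1) * (g.length + 2)
decreasing_by
  have h2 : (pvFree g (PySem.Set.add vis t) + 1) * (g.length + 2)
      ≤ pvFree g vis * (g.length + 2) := Nat.mul_le_mul_right _ h
  have h3 : (pvFree g vis + 1) * (g.length + 2)
      = pvFree g vis * (g.length + 2) + (g.length + 2) := by ring
  omega

-- Python's `for other_task, deps in dependency_graph.items(): if task_id in deps: …`
def count_pb_loop (g : List (String × List String)) (pending : List (String × List String))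
    (t : String) (l : Int) (vis' : PySem.Set String)
    (acc : PySem.Dict Int (List String)) : PySem.Dict Int (List String) :=
  match pending with
  | [] => acc
  | (o, deps) :: rest =>
      count_pb_loop g rest t l vis'
        (if t ∈ deps then count_pb_assign g o (l + 1) vis' acc else acc)
termination_by (pvFree g vis' + 1) * (g.length + 2) + pending.length + 1
decreasing_by
  · simp only [List.length_cons]; omega
  · simp only [List.length_cons]; omega
end

def count_parallel_branches_py (dependency_graph : List (String × List String)) : Int :=
  let independents :=
    (dependency_graph.filter (fun p => p.2.isEmpty)).map Prod.fst
  let levels := independents.foldl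
    (fun lv t => count_pb_assign dependency_graph t 0 PySem.Set.empty lv) PySem.Dict.empty
  if levels.items = [] then 0
  else (PySem.List.max? (levels.values.map (fun ts => (ts.length : Int))) (fun x => x)).getD 0

-- ===== PORT B =====
-- the child frames `[(other, level+1, visited | {task_id}) for other, deps in g.items() if task_id in deps]`
def pvChildren (g : List (String × List String)) (t : String) (l : Int)
    (vis' : PySem.Set String) : List (String × Int × PySem.Set String) :=
  (g.filter (fun p => decide (t ∈ p.2))).map (fun p => (p.1, l + 1, vis'))

def pvStackWeight (g : List (String × List String))
    (fr : String × Int × PySem.Set String) : Nat :=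
  (g.length + 1) ^ (pvFree g fr.2.2)

-- termination bound for the stack loop, cited by `decreasing_by` below
theorem pvChildren_weight_lt (g : List (String × List String)) (t : String) (l : Int)
    (vis : PySem.Set String) (vis' : PySem.Set String)
    (h : pvFree g vis' < pvFree g vis) :
    ((pvChildren g t l vis').map (pvStackWeight g)).sum < pvStackWeight g (t, l, vis) := by
  have hlen : (g.filter (fun p => decide (t ∈ p.2))).length ≤ g.length :=
    List.length_filter_le _ _
  have hsum : ((pvChildren g t l vis').map (pvStackWeight g)).sum
      = (g.filter (fun p => decide (t ∈ p.2))).length * (g.length + 1) ^ (pvFree g vis') := by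
    simp [pvChildren, pvStackWeight, List.map_map, Function.comp_def, List.sum_replicate,
      List.map_const']
  have hpow : (g.length + 1) ^ (pvFree g vis') ≤ (g.length + 1) ^ (pvFree g vis - 1) :=
    Nat.pow_le_pow_right (by omega) (by omega)
  have hfin : (g.length + 1) * (g.length + 1) ^ (pvFree g vis - 1)
      = (g.length + 1) ^ (pvFree g vis) := by
    rw [← pow_succ']
    congr 1
    omega
  have hpos : 0 < (g.length + 1) ^ (pvFree g vis - 1) := Nat.pow_pos (by omega)
  calc ((pvChildren g t l vis').map (pvStackWeight g)).sum
      = (g.filter (fun p => decide (t ∈ p.2))).length * (g.length + 1) ^ (pvFree g vis') := hsum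
    _ ≤ g.length * (g.length + 1) ^ (pvFree g vis - 1) := Nat.mul_le_mul hlen hpow
    _ < (g.length + 1) * (g.length + 1) ^ (pvFree g vis - 1) :=
        (Nat.mul_lt_mul_right hpos).mpr (by omega)
    _ = pvStackWeight g (t, l, vis) := by rw [hfin]; rfl

-- the `while stack:` loop; the Lean list's HEAD models the END of the Python list
-- (Python pops from the end; `stack.extend(reversed(children))` therefore puts
-- `children` in graph order on top, i.e. `pvChildren … ++ rest` here).
def count_pb_stack (g : List (String × List String))
    (stack : List (String × Int × PySem.Set String)) (counts : PySem.Dict Int Int) :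
    PySem.Dict Int Int :=
  match stack with
  | [] => counts
  | (t, l, vis) :: rest =>
    if PySem.Set.contains vis t then count_pb_stack g rest counts
    else
      let counts' := counts.insert l (counts.getD l 0 + 1)
      let vis' := PySem.Set.add vis t
      if h : pvFree g vis' < pvFree g vis then
        count_pb_stack g (pvChildren g t l vis' ++ rest) counts'
      else count_pb_stack g rest counts'
termination_by (stack.map (pvStackWeight g)).sum
decreasing_by
  · have : 0 < pvStackWeight g (t, l, vis) := Nat.pow_pos (by omega)
    simp only [List.map_cons, List.sum_cons]; omega
  · have h1 := pvChildren_weight_lt g t l vis (PySem.Set.add vis t) h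
    simp only [List.map_cons, List.sum_cons, List.map_append, List.sum_append]
    omega
  · have : 0 < pvStackWeight g (t, l, vis) := Nat.pow_pos (by omega)
    simp only [List.map_cons, List.sum_cons]; omega

def count_parallel_branches_py_alt (dependency_graph : List (String × List String)) : Int :=
  -- initial stack: independent tasks; built in graph order and reversed in Python,
  -- so with head-as-top it is exactly the graph-order list
  let stack0 := (dependency_graph.filter (fun p => p.2.isEmpty)).map
    (fun p => (p.1, (0 : Int), (PySem.Set.empty : PySem.Set String)))
  let counts := count_pb_stack dependency_graph stack0 PySem.Dict.empty
  if counts.items = [] then 0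
  else (PySem.List.max? counts.values (fun x => x)).getD 0

-- ===== PRECONDITION & SPEC =====
def Spec_count_parallel_branches_py (dependency_graph : List (String × List String)) (out : Int) : Prop := out = count_parallel_branches_py_alt dependency_graph
instance (dependency_graph : List (String × List String)) (out : Int) : Decidable (Spec_count_parallel_branches_py dependency_graph out) := by unfold Spec_count_parallel_branches_py; infer_instance

-- ===== CLAIM (what is proved, stated in full; the proofs are below) =====
def Claim_equal_count_parallel_branches_py : Prop := ∀ (dependency_graph : List (String × List String)), Dom_count_parallel_branches_py dependency_graph → Spec_count_parallel_branches_py dependency_graph (count_parallel_branches_py dependency_graph)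

-- ===== LEMMAS AND PROOFS =====

-- The common visit sequence of both programs: the (level, task) pairs recorded by one
-- call of A's `assign_level` (equivalently: by popping one B frame and its descendants),
-- in A's visit order.
mutual
def pvSeq (g : List (String × List String)) (t : String) (l : Int)
    (vis : PySem.Set String) : List (Int × String) :=
  if PySem.Set.contains vis t then []
  else
    let vis' := PySem.Set.add vis t
    (l, t) :: (if h : pvFree g vis' < pvFree g vis then pvSeqLoop g g t l vis' else [])
termination_by (pvFree g vis + 1) * (g.length + 2)
decreasing_by
  have h2 : (pvFree g (PySem.Set.add vis t) + 1) * (g.length + 2)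
      ≤ pvFree g vis * (g.length + 2) := Nat.mul_le_mul_right _ h
  have h3 : (pvFree g vis + 1) * (g.length + 2)
      = pvFree g vis * (g.length + 2) + (g.length + 2) := by ring
  omega

def pvSeqLoop (g : List (String × List String)) (pending : List (String × List String))
    (t : String) (l : Int) (vis' : PySem.Set String) : List (Int × String) :=
  match pending with
  | [] => []
  | (o, deps) :: rest =>
      (if t ∈ deps then pvSeq g o (l + 1) vis' else []) ++ pvSeqLoop g rest t l vis'
termination_by (pvFree g vis' + 1) * (g.length + 2) + pending.length + 1
decreasing_by
  · simp only [List.length_cons]; omega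
  · simp only [List.length_cons]; omega
end

theorem pv_both_eq (g : List (String × List String)) :
    (∀ (t : String) (l : Int) (vis : PySem.Set String) (levels : PySem.Dict Int (List String)),
      count_pb_assign g t l vis levels
        = (pvSeq g t l vis).foldl (fun d p => pvDictAppend d p.1 p.2) levels)
    ∧ (∀ (pending : List (String × List String)) (t : String) (l : Int)
        (vis' : PySem.Set String) (acc : PySem.Dict Int (List String)),
      count_pb_loop g pending t l vis' acc
        = (pvSeqLoop g pending t l vis').foldl (fun d p => pvDictAppend d p.1 p.2) acc) := by
  apply count_pb_assign.mutual_induct g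
    (motive1 := fun t l vis levels => count_pb_assign g t l vis levels
        = (pvSeq g t l vis).foldl (fun d p => pvDictAppend d p.1 p.2) levels)
    (motive2 := fun pending t l vis' acc => count_pb_loop g pending t l vis' acc
        = (pvSeqLoop g pending t l vis').foldl (fun d p => pvDictAppend d p.1 p.2) acc)
  · intro t l vis levels hvis
    rw [count_pb_assign, pvSeq]
    simp only [hvis, if_true, List.foldl_nil]
  · intro t l vis levels hvis _ _ hlt ih
    replace hlt : pvFree g (PySem.Set.add vis t) < pvFree g vis := hlt
    rw [count_pb_assign, pvSeq]
    simp only [hvis, Bool.false_eq_true, if_false]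
    rw [dif_pos hlt, dif_pos hlt, List.foldl_cons]
    exact ih
  · intro t l vis levels hvis _ hlt
    replace hlt : ¬ pvFree g (PySem.Set.add vis t) < pvFree g vis := hlt
    rw [count_pb_assign, pvSeq]
    simp only [hvis, Bool.false_eq_true, if_false]
    rw [dif_neg hlt, dif_neg hlt, List.foldl_cons, List.foldl_nil]
  · intro t l vis' acc
    simp [count_pb_loop, pvSeqLoop]
  · intro t l vis' acc o deps rest ih1 ih2
    by_cases hd : t ∈ deps
    · simp only [count_pb_loop, pvSeqLoop, hd, if_true, dif_pos] at ih2 ⊢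
      rw [ih2, List.foldl_append, ih1]
    · simp only [count_pb_loop, pvSeqLoop, hd, if_false] at ih2 ⊢
      simpa using ih2

theorem pv_children_seq (g : List (String × List String)) (t : String) (l : Int)
    (vis' : PySem.Set String) (pending : List (String × List String)) :
    ((pending.filter (fun p => decide (t ∈ p.2))).map
        (fun p => (p.1, l + 1, vis'))).flatMap (fun fr => pvSeq g fr.1 fr.2.1 fr.2.2)
      = pvSeqLoop g pending t l vis' := by
  induction pending with
  | nil => rw [pvSeqLoop]; simp
  | cons hd tl ih =>
    obtain ⟨o, deps⟩ := hd
    rw [pvSeqLoop]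
    by_cases hdm : t ∈ deps
    · simp [hdm, ih]
    · simp [hdm, ih]

theorem pv_children_seq' (g : List (String × List String)) (t : String) (l : Int)
    (vis' : PySem.Set String) :
    (pvChildren g t l vis').flatMap (fun fr => pvSeq g fr.1 fr.2.1 fr.2.2)
      = pvSeqLoop g g t l vis' := pv_children_seq g t l vis' g

theorem pv_stack_eq (g : List (String × List String))
    (stack : List (String × Int × PySem.Set String)) (counts : PySem.Dict Int Int) :
    count_pb_stack g stack counts
      = (stack.flatMap (fun fr => pvSeq g fr.1 fr.2.1 fr.2.2)).foldl
          (fun d p => d.insert p.1 (d.getD p.1 0 + 1)) counts := by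
  induction stack, counts using count_pb_stack.induct g with
  | case1 counts => rw [count_pb_stack]; simp
  | case2 counts t l vis rest hvis ih =>
    have hm : t ∈ vis := by simpa [PySem.Set.contains] using hvis
    have hseq : pvSeq g t l vis = [] := by
      rw [pvSeq]; simp [hm]
    rw [count_pb_stack]
    simp only [hvis, if_true, List.flatMap_cons, hseq, List.nil_append]
    exact ih
  | case3 counts t l vis rest hvis _ _ hlt ih =>
    replace hlt : pvFree g (PySem.Set.add vis t) < pvFree g vis := hlt
    have hseq : pvSeq g t l vis
        = (l, t) :: pvSeqLoop g g t l (PySem.Set.add vis t) := by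
      rw [pvSeq]; simp only [hvis, Bool.false_eq_true, if_false]; rw [dif_pos hlt]
    rw [count_pb_stack]
    simp only [hvis, Bool.false_eq_true, if_false]
    rw [dif_pos hlt]
    rw [ih, List.flatMap_cons, hseq, List.flatMap_append, List.cons_append,
      List.foldl_cons, pv_children_seq']
  | case4 counts t l vis rest hvis _ _ hlt ih =>
    replace hlt : ¬ pvFree g (PySem.Set.add vis t) < pvFree g vis := hlt
    have hseq : pvSeq g t l vis = [(l, t)] := by
      rw [pvSeq]; simp only [hvis, Bool.false_eq_true, if_false]; rw [dif_neg hlt]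
    rw [count_pb_stack]
    simp only [hvis, Bool.false_eq_true, if_false]
    rw [dif_neg hlt]
    rw [ih, List.flatMap_cons, hseq, List.cons_append, List.nil_append, List.foldl_cons]

theorem pvDictAppend_eq_modify (d : PySem.Dict Int (List String)) (l : Int) (t : String) :
    pvDictAppend d l t = d.modify l [] (fun ts => ts ++ [t]) := by
  by_cases hc : d.contains l
  · simp [pvDictAppend, hc]
  · simp only [pvDictAppend, hc, Bool.false_eq_true, if_false]
    simp [PySem.Dict.modify, PySem.Dict.getD_insert_self,
      PySem.Dict.insert_insert_self, PySem.Dict.getD_of_not_contains d [] (by simpa using hc)]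

theorem pv_afold_eq (g : List (String × List String)) (ts : List String)
    (d : PySem.Dict Int (List String)) :
    ts.foldl (fun lv t => count_pb_assign g t 0 PySem.Set.empty lv) d
      = (ts.flatMap (fun t => pvSeq g t 0 PySem.Set.empty)).foldl
          (fun dd p => pvDictAppend dd p.1 p.2) d := by
  induction ts generalizing d with
  | nil => rfl
  | cons t ts ih =>
    rw [List.foldl_cons, List.flatMap_cons, List.foldl_append, (pv_both_eq g).1, ih]

theorem count_parallel_branches_py_spec' (g : List (String × List String)) :
    count_parallel_branches_py g = count_parallel_branches_py_alt g := by
  unfold count_parallel_branches_py count_parallel_branches_py_alt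
  simp only [pv_afold_eq, pv_stack_eq, List.flatMap_map]
  rw [show (fun (dd : PySem.Dict Int (List String)) (p : Int × String) => pvDictAppend dd p.1 p.2)
      = (fun dd p => dd.modify p.1 [] (fun ts => ts ++ [p.2])) from by
    funext dd p; exact pvDictAppend_eq_modify dd p.1 p.2]
  set S : List (Int × String) :=
    (g.filter (fun p => p.2.isEmpty)).flatMap (fun a => pvSeq g a.1 0 PySem.Set.empty) with hS
  set xs : List Int := S.map Prod.fst with hxs
  set levels : PySem.Dict Int (List String) :=
    S.foldl (fun dd p => dd.modify p.1 [] (fun ts => ts ++ [p.2])) PySem.Dict.empty with hlev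
  -- B side: fold over S with the key projection is Counter(levels sequence)
  have hB : S.foldl (fun (d : PySem.Dict Int Int) (p : Int × String) =>
        d.insert p.1 (d.getD p.1 0 + 1)) PySem.Dict.empty
      = PySem.Dict.counter xs := by
    rw [← PySem.Dict.foldl_insert_getD_add_one_eq_counter, hxs, List.foldl_map]
  rw [hB]
  have hk : levels.keys = PySem.Set.ofList xs := by
    rw [hlev, PySem.Dict.keys_foldl_modify_key S Prod.fst []
      (fun d p => (fun ts => ts ++ [p.2])) PySem.Dict.empty]
    rfl
  have hnd : levels.keys.Nodup := by
    rw [hlev]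
    exact PySem.Dict.nodup_keys_foldl_modify_key S Prod.fst []
      (fun d p => (fun ts => ts ++ [p.2])) PySem.Dict.empty (by simp)
  have hAvals : levels.values.map (fun ts => (ts.length : Int))
      = (PySem.Set.ofList xs).map (fun k => (xs.count k : Int)) := by
    rw [PySem.Dict.values_eq_map_keys levels hnd [], hk, List.map_map]
    refine List.map_congr_left ?_
    intro k hkmem
    have hget : levels.getD k [] = (S.filter (fun p => p.1 == k)).map (fun x => x.2) := by
      rw [hlev, PySem.Dict.getD_foldl_modify_append S PySem.Dict.empty k]
      simp
    simp only [Function.comp_apply, hget, List.length_map]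
    rw [← List.countP_eq_length_filter]
    rw [hxs, List.count, List.countP_map]
    rfl
  have hBvals : (PySem.Dict.counter xs).values
      = (PySem.Set.ofList xs).map (fun k => (xs.count k : Int)) := by
    show ((PySem.Dict.counter xs).items).map (fun x => x.2)
      = (PySem.Set.ofList xs).map (fun k => (xs.count k : Int))
    rw [PySem.Dict.items_counter, List.map_map]
    rfl
  have hAempty : (levels.items = []) ↔ (PySem.Set.ofList xs = []) := by
    constructor
    · intro h; rw [← hk]; show levels.items.map Prod.fst = []; rw [h]; rfl
    · intro h
      have : levels.items.map Prod.fst = [] := by rw [← PySem.Dict.keys] at *; rw [hk, h]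
      exact List.map_eq_nil_iff.mp this
  have hBempty : ((PySem.Dict.counter xs).items = []) ↔ (PySem.Set.ofList xs = []) := by
    rw [PySem.Dict.items_counter, List.map_eq_nil_iff]
  by_cases hempty : PySem.Set.ofList xs = []
  · rw [if_pos (hAempty.mpr hempty), if_pos (hBempty.mpr hempty)]
  · rw [if_neg (fun h => hempty (hAempty.mp h)), if_neg (fun h => hempty (hBempty.mp h)),
      hAvals, hBvals]

-- ===== VERDICT (by name: the statement is the Claim_ definition above) =====
theorem count_parallel_branches_py_spec : Claim_equal_count_parallel_branches_py := by
  intro g _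
  unfold Spec_count_parallel_branches_py
  exact count_parallel_branches_py_spec' g
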